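-- pv_equiv track=rewrite | github.com/AashirRaz/Jarvis | ios_build.py | extract_schemes
-- ===== SOURCE A (Python) =====
-- def extract_schemes(output:str):
--     schemes = []
--     scheme_section = False
--
--     for line in output.splitlines():
--         line = line.strip()
--         if line == "Schemes:":
--             scheme_section = True
--             continue
--         if scheme_section:
--             if line:
--                 schemes.append(line)
--             else:
--                 break  # Stop if we hit an empty line after schemes
--
--     return schemes
-- ===== SOURCE B (Python) =====
-- def extract_schemes(output: str):
--     lines = [l.strip() for l in output.splitlines()]
--     try:
--         idx = lines.index("Schemes:")
--     except ValueError: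
--         return []
--     tail = lines[idx + 1:]
--     end = tail.index("") if "" in tail else len(tail)
--     return tail[:end]
-- ===== Notes on version B (the rewrite author's own statement) =====
-- stated objective: idiomatic
-- what changed: Replaced the single-pass boolean state machine with a locate-then-slice formulation: strip all lines once, find the header with list.index, and slice the tail up to the first empty line.
-- outside the precondition, e.g. on extract_schemes('Schemes:\nSchemes:\nx'): A returns ['x'], B returns ['Schemes:', 'x']
import Mathlib
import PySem

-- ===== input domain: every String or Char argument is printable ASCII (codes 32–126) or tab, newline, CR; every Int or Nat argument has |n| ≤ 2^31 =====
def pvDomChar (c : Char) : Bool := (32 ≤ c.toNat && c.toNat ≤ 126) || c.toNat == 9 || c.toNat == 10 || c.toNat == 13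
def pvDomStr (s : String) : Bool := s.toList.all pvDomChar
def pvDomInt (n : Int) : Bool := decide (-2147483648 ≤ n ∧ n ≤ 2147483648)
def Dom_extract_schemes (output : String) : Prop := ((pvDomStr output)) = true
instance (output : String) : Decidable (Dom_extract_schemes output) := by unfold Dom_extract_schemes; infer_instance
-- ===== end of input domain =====

-- One honest line: B replaces A's one-pass boolean state machine by strip-all-lines,
-- locate the "Schemes:" header with list.index, then slice up to the first empty line (idiomatic).

-- ===== PORT A =====
-- the for-loop with its `break`: structural recursion over the remaining lines,
-- carrying the accumulated schemes and the scheme_section flag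
def extract_schemes.go : List String → List String → Bool → List String
  | [], schemes, _ => schemes
  | l :: rest, schemes, sect =>
    let line := PySem.Str.strip l
    if line == "Schemes:" then extract_schemes.go rest schemes true
    else if sect then
      if line ≠ "" then extract_schemes.go rest (schemes ++ [line]) true
      else schemes            -- break
    else extract_schemes.go rest schemes sect

def extract_schemes (output : String) : List String :=
  extract_schemes.go (PySem.Str.splitlines output) [] false

-- ===== PORT B =====
def extract_schemes_alt (output : String) : List String :=
  let lines := (PySem.Str.splitlines output).map PySem.Str.strip
  match PySem.List.index? lines "Schemes:" with
  | none => []                                       -- except ValueError: return []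
  | some idx =>
    let tail := PySem.List.slice lines (some ((idx : Int) + 1)) none   -- lines[idx+1:]
    let e := match PySem.List.index? tail "" with     -- tail.index("") if "" in tail
             | some e => e
             | none => tail.length                    -- else len(tail)
    PySem.List.slice tail none (some (e : Int))       -- tail[:end]

-- ===== PRECONDITION & SPEC =====
-- Pre_ excludes outputs whose stripped lines contain "Schemes:" more than once: there A's
-- accidental skipping of a repeated header line inside the section and B's keeping it are
-- both defensible readings of an unspecified corner.
def Pre_extract_schemes (output : String) : Prop :=
  ((PySem.Str.splitlines output).map PySem.Str.strip).count "Schemes:" ≤ 1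
instance (output : String) : Decidable (Pre_extract_schemes output) := by
  unfold Pre_extract_schemes; infer_instance

def pvWitness_extract_schemes : String := "Schemes:\nA\n\nB"

def Spec_extract_schemes (output : String) (out : List String) : Prop := out = extract_schemes_alt output
instance (output : String) (out : List String) : Decidable (Spec_extract_schemes output out) := by unfold Spec_extract_schemes; infer_instance

-- ===== CLAIM (what is proved, stated in full; the proofs are below) =====
def Claim_equal_extract_schemes : Prop := ∀ (output : String), Dom_extract_schemes output → Pre_extract_schemes output → Spec_extract_schemes output (extract_schemes output)

-- ===== LEMMAS AND PROOFS =====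

-- after the header: A appends until the break; with no further header this is takeWhile (≠ "")
lemma go_section (ls : List String) (acc : List String)
    (h : "Schemes:" ∉ ls.map PySem.Str.strip) :
    extract_schemes.go ls acc true = acc ++ (ls.map PySem.Str.strip).takeWhile (· ≠ "") := by
  induction ls generalizing acc with
  | nil => simp [extract_schemes.go]
  | cons l rest ih =>
    simp only [List.map_cons, List.mem_cons, not_or] at h
    obtain ⟨h1, h2⟩ := h
    by_cases he : PySem.Str.strip l = ""
    · simp [extract_schemes.go, he]
    · simp [extract_schemes.go, he, (beq_iff_eq).ne.mpr (fun hh => h1 hh.symm), ih _ h2]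

-- taking up to the first "" (or all of it) is takeWhile (≠ "")
lemma take_firstEmpty (tail : List String) :
    tail.take (match PySem.List.index? tail "" with | some e => e | none => tail.length)
      = tail.takeWhile (· ≠ "") := by
  induction tail with
  | nil => simp
  | cons t rest ih =>
    by_cases ht : t = ""
    · subst ht; rw [PySem.List.index?_cons_self]; simp
    · rw [PySem.List.index?_cons_of_ne rest ht]
      cases h : PySem.List.index? rest "" with
      | none => simp only [h] at ih ⊢; simp [ht, ih]
      | some e => simp only [h] at ih ⊢; simp [ht, ih]

-- the core equivalence on the stripped lines
lemma go_eq_core (ls : List String)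
    (h : (ls.map PySem.Str.strip).count "Schemes:" ≤ 1) :
    extract_schemes.go ls [] false
      = match PySem.List.index? (ls.map PySem.Str.strip) "Schemes:" with
        | none => []
        | some i => ((ls.map PySem.Str.strip).drop (i + 1)).takeWhile (· ≠ "") := by
  induction ls with
  | nil => simp [extract_schemes.go]
  | cons l rest ih =>
    by_cases hl : PySem.Str.strip l = "Schemes:"
    · have hrest : "Schemes:" ∉ rest.map PySem.Str.strip := by
        rw [List.map_cons, hl, List.count_cons_self] at h
        simp only [← List.count_pos_iff]
        omega
      simp only [List.map_cons, hl, PySem.List.index?_cons_self]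
      simp [extract_schemes.go, hl, go_section rest [] hrest]
    · have h' : (rest.map PySem.Str.strip).count "Schemes:" ≤ 1 := by
        rw [List.map_cons, List.count_cons] at h
        split at h <;> omega
      rw [List.map_cons, PySem.List.index?_cons_of_ne (rest.map PySem.Str.strip) hl]
      have := ih h'
      simp only [extract_schemes.go, (beq_iff_eq).ne.mpr hl, Bool.false_eq_true,
        ite_false]
      cases hidx : PySem.List.index? (rest.map PySem.Str.strip) "Schemes:" with
      | none =>
        simp only [hidx] at this
        simpa [hidx] using this
      | some i =>
        simp only [hidx] at this
        simpa [hidx, List.drop_succ_cons] using this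

-- ===== VERDICT (by name: the statement is the Claim_ definition above) =====
theorem extract_schemes_spec : Claim_equal_extract_schemes := by
  intro output _ hpre
  unfold Spec_extract_schemes extract_schemes extract_schemes_alt
  rw [go_eq_core _ hpre]
  cases hidx : PySem.List.index? ((PySem.Str.splitlines output).map PySem.Str.strip) "Schemes:" with
  | none => simp only [hidx]
  | some i =>
    simp only [hidx]
    have hcast : ((i : Int) + 1) = ((i + 1 : Nat) : Int) := by push_cast; ring
    rw [hcast, PySem.List.slice_from_natCast]
    set tail := ((PySem.Str.splitlines output).map PySem.Str.strip).drop (i + 1)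
    rw [← take_firstEmpty tail]
    cases he : PySem.List.index? tail "" with
    | none => rw [PySem.List.slice_to_natCast, List.take_length]
    | some e => rw [PySem.List.slice_to_natCast]
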